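-- pv_equiv track=rewrite | github.com/Tom-Drs/7wonders | decks.py | put_with_resource
-- ===== SOURCE A (Python) =====
-- import copy
--
-- def put_with_resource(ressources: dict, cost: dict) -> dict:
--     cost_copy = copy.copy(cost)
--     for key, value in ressources.items():
--         if cost_copy.get(key) != None:
--             cost_copy[key] -= value
--             if cost_copy[key] == 0:
--                 del cost_copy[key]
--     return cost_copy
-- ===== SOURCE B (Python) =====
-- def put_with_resource(ressources: dict, cost: dict) -> dict:
--     # Recursively build the result as a list of (key, amount) pairs,
--     # assembled back-to-front, then turn it into a dict at the end.
--     def go(items):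
--         if not items:
--             return []
--         (k, v), rest = items[0], items[1:]
--         tail = go(rest)
--         if k not in ressources:
--             return [(k, v)] + tail
--         nv = v - ressources[k]
--         return tail if nv == 0 else [(k, nv)] + tail
--
--     return dict(go(list(cost.items())))
-- ===== Notes on version B (the rewrite author's own statement) =====
-- stated objective: alternative
-- what changed: A copies cost and mutates it in place while looping over ressources; B instead recurses over cost's items, building the surviving (key, amount) pairs back-to-front as a plain list and converting to a dict only at the end (staged: recursive pair construction, then dict()).
import Mathlib
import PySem

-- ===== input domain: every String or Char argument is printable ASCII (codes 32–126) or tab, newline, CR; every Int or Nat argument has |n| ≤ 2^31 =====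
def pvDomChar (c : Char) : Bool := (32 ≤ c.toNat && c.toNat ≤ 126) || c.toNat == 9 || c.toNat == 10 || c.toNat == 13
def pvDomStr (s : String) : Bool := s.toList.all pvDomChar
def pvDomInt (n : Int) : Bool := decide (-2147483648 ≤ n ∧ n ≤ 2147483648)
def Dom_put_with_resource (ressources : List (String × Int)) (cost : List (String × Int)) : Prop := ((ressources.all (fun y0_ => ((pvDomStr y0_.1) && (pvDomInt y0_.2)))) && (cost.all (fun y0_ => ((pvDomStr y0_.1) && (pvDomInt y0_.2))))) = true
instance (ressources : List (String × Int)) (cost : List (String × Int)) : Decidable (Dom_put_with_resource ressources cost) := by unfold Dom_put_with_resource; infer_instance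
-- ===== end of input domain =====

-- B recursively builds the surviving (key, amount) pairs back-to-front as a list, then makes a dict,
-- instead of A's copy-of-cost mutated in place while looping over ressources (objective: alternative).

-- ===== PORT A =====
-- copy.copy(cost); for each (key, value) of ressources: if cost_copy.get(key) != None,
-- subtract value in place and delete the key when the new amount is 0.
def put_with_resource (ressources : List (String × Int)) (cost : List (String × Int)) : List (String × Int) :=
  let rd := PySem.Dict.ofList ressources
  let cd := PySem.Dict.ofList cost
  (rd.items.foldl
    (fun acc kv =>
      match acc.get? kv.1 with
      | none => acc
      | some cv =>
        if cv - kv.2 = 0 then acc.erase kv.1 else acc.insert kv.1 (cv - kv.2))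
    cd).items

-- ===== PORT B =====
-- go(items): recursion over cost.items(); [(k, v)] + tail when k not in ressources,
-- else drop when v - ressources[k] == 0, else [(k, v - ressources[k])] + tail; dict(...) at the end.
def pwrGo (rd : PySem.Dict String Int) : List (String × Int) → List (String × Int)
  | [] => []
  | (k, v) :: rest =>
    let tail := pwrGo rd rest
    match rd.get? k with
    | none => (k, v) :: tail
    | some w => if v - w = 0 then tail else (k, v - w) :: tail

def put_with_resource_alt (ressources : List (String × Int)) (cost : List (String × Int)) : List (String × Int) :=
  let rd := PySem.Dict.ofList ressources
  (PySem.Dict.ofList (pwrGo rd (PySem.Dict.ofList cost).items) : PySem.Dict String Int).items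

-- ===== PRECONDITION & SPEC =====
def Spec_put_with_resource (ressources : List (String × Int)) (cost : List (String × Int)) (out : List (String × Int)) : Prop := out = put_with_resource_alt ressources cost
instance (ressources : List (String × Int)) (cost : List (String × Int)) (out : List (String × Int)) : Decidable (Spec_put_with_resource ressources cost out) := by unfold Spec_put_with_resource; infer_instance

-- ===== CLAIM =====
def Claim_equal_put_with_resource : Prop := ∀ (ressources : List (String × Int)) (cost : List (String × Int)), Dom_put_with_resource ressources cost → Spec_put_with_resource ressources cost (put_with_resource ressources cost)

-- ===== LEMMAS AND PROOFS =====

-- A's total effect on one cost entry of processing the remaining resource list rs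
def gL (rs : List (String × Int)) (kv : String × Int) : Option (String × Int) :=
  match (PySem.Dict.mk rs).get? kv.1 with
  | none => some kv
  | some w => if kv.2 - w = 0 then none else some (kv.1, kv.2 - w)

theorem filterMap_filter_eq {α β : Type} (p : α → Bool) (f : α → Option β) (l : List α) :
    (l.filter p).filterMap f = l.filterMap (fun x => if p x then f x else none) := by
  induction l with
  | nil => rfl
  | cons x t ih => by_cases h : p x <;> simp [List.filterMap_cons, h, ih]

theorem nodup_keys_erase (d : PySem.Dict String Int) (k : String)
    (h : d.keys.Nodup) : (d.erase k).keys.Nodup :=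
  (List.filter_sublist.map _).nodup h

theorem mem_items_val_eq (d : PySem.Dict String Int) (hnd : d.keys.Nodup)
    {k : String} {v cv : Int} (hm : (k, v) ∈ d.items) (hg : d.get? k = some cv) : v = cv := by
  have h2 := (PySem.Dict.get?_eq_some_iff_mem_items d k v hnd).2 hm
  rw [hg] at h2
  exact (Option.some_inj.mp h2).symm

-- invariant of A's loop over the resource items
theorem foldA_items (rs : List (String × Int)) (d : PySem.Dict String Int)
    (hrs : (rs.map Prod.fst).Nodup) (hd : d.keys.Nodup) :
    (rs.foldl
      (fun acc kv =>
        match acc.get? kv.1 with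
        | none => acc
        | some cv =>
          if cv - kv.2 = 0 then acc.erase kv.1 else acc.insert kv.1 (cv - kv.2))
      d).items = d.items.filterMap (gL rs) := by
  induction rs generalizing d with
  | nil =>
      simp [gL, PySem.Dict.get?]
  | cons p t ih =>
      obtain ⟨k0, w0⟩ := p
      simp only [List.map_cons, List.nodup_cons] at hrs
      have hk0t : (PySem.Dict.mk t).get? k0 = none := by
        rw [PySem.Dict.get?_eq_none_iff_not_mem_keys]
        simpa [PySem.Dict.keys] using hrs.1
      have hgl : ∀ kv : String × Int, kv.1 ≠ k0 → gL ((k0, w0) :: t) kv = gL t kv := by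
        intro kv hne
        simp [gL, PySem.Dict.get?_mk_cons, (by simpa using (Ne.symm hne) : ¬ k0 = kv.1)]
      simp only [List.foldl_cons]
      cases hg : d.get? k0 with
      | none =>
          rw [ih _ hrs.2 hd]
          apply List.filterMap_congr
          intro kv hkv
          have hne : kv.1 ≠ k0 := by
            intro he
            have hk : k0 ∈ d.keys := by
              rw [← he]; exact PySem.Dict.mem_keys_of_mem_items d hkv
            rw [PySem.Dict.get?_eq_none_iff_not_mem_keys d k0] at hg
            exact hg hk
          exact (hgl kv hne).symm
      | some cv =>
          have hred : (match some cv with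
              | none => d
              | some cv => if cv - w0 = 0 then d.erase k0 else d.insert k0 (cv - w0))
              = if cv - w0 = 0 then d.erase k0 else d.insert k0 (cv - w0) := rfl
          rw [hred]
          by_cases hz : cv - w0 = 0
          · rw [if_pos hz, ih _ hrs.2 (nodup_keys_erase d k0 hd)]
            show ((d.items.filter _).filterMap (gL t)) = _
            rw [filterMap_filter_eq]
            apply List.filterMap_congr
            intro kv hkv
            by_cases hne : kv.1 = k0
            · obtain ⟨k, v⟩ := kv
              simp only at hne; subst hne
              have hv : v = cv := mem_items_val_eq d hd hkv hg
              subst hv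
              simp [gL, PySem.Dict.get?_mk_cons, hz]
            · rw [if_pos (by simpa using hne : (!kv.1 == k0) = true)]
              exact (hgl kv hne).symm
          · have hc : d.contains k0 = true := by
              rw [PySem.Dict.contains_eq_isSome_get? d k0, hg]; rfl
            rw [if_neg hz, ih _ hrs.2 (PySem.Dict.nodup_keys_insert d k0 _ hd)]
            rw [PySem.Dict.items_insert_of_contains d _ hc, List.filterMap_map]
            apply List.filterMap_congr
            intro kv hkv
            by_cases hne : kv.1 = k0
            · obtain ⟨k, v⟩ := kv
              simp only at hne; subst hne
              have hv : v = cv := mem_items_val_eq d hd hkv hg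
              subst hv
              simp [gL, Function.comp, PySem.Dict.get?_mk_cons, hk0t, hz]
            · have hb : (kv.1 == k0) = false := by simpa using hne
              simp only [Function.comp_apply, hb, Bool.false_eq_true, if_false]
              exact (hgl kv hne).symm

-- B's recursion computes the same filterMap
theorem pwrGo_eq (rd : PySem.Dict String Int) (l : List (String × Int)) :
    pwrGo rd l = l.filterMap (gL rd.items) := by
  induction l with
  | nil => rfl
  | cons kv t ih =>
      obtain ⟨k, v⟩ := kv
      have hg : gL rd.items (k, v) = (match rd.get? k with
        | none => some (k, v)
        | some w => if v - w = 0 then none else some (k, v - w)) := rfl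
      simp only [pwrGo, List.filterMap_cons, hg]
      cases h : rd.get? k with
      | none => simp [ih]
      | some w => by_cases hz : v - w = 0 <;> simp [hz, ih]

-- gL keeps the key of each entry it keeps; hence the output keys are a sublist of the input keys
theorem filterMap_gL_keys_sublist (rs l : List (String × Int)) :
    ((l.filterMap (gL rs)).map Prod.fst).Sublist (l.map Prod.fst) := by
  induction l with
  | nil => simp
  | cons kv t ih =>
      simp only [List.filterMap_cons, List.map_cons]
      cases h : gL rs kv with
      | none => exact ih.cons _
      | some w =>
          have hw : w.1 = kv.1 := by
            unfold gL at h
            cases hg : (PySem.Dict.mk rs).get? kv.1 with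
            | none =>
                rw [hg] at h
                exact congrArg Prod.fst (Option.some_inj.mp h).symm
            | some u =>
                rw [hg] at h
                have h' : (if kv.2 - u = 0 then (none : Option (String × Int))
                    else some (kv.1, kv.2 - u)) = some w := h
                by_cases hz : kv.2 - u = 0
                · rw [if_pos hz] at h'; exact absurd h' (by simp)
                · rw [if_neg hz] at h'
                  exact congrArg Prod.fst (Option.some_inj.mp h').symm |>.trans rfl
          rw [List.map_cons, hw]
          exact ih.cons₂ _

-- dict(pairs) with distinct keys returns the pairs unchanged
theorem items_ofList_nodup (l : List (String × Int))
    (h : (l.map Prod.fst).Nodup) :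
    (PySem.Dict.ofList l : PySem.Dict String Int).items = l := by
  have hfold : (PySem.Dict.ofList l : PySem.Dict String Int)
      = l.foldl (fun d kv => d.insert kv.1 kv.2) PySem.Dict.empty := rfl
  rw [hfold,
    PySem.Dict.items_foldl_insert_fresh l Prod.fst Prod.snd PySem.Dict.empty
      (fun a _ => rfl) h]
  simp [PySem.Dict.empty]

-- ===== VERDICT =====
theorem put_with_resource_spec : Claim_equal_put_with_resource := by
  intro r c _
  show put_with_resource r c = put_with_resource_alt r c
  unfold put_with_resource put_with_resource_alt
  have hr : (((PySem.Dict.ofList r : PySem.Dict String Int)).items.map Prod.fst).Nodup := by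
    simpa [PySem.Dict.keys] using PySem.Dict.nodup_keys_ofList (ps := r)
  have hc : (((PySem.Dict.ofList c : PySem.Dict String Int)).items.map Prod.fst).Nodup := by
    simpa [PySem.Dict.keys] using PySem.Dict.nodup_keys_ofList (ps := c)
  have hck : ((PySem.Dict.ofList c : PySem.Dict String Int)).keys.Nodup :=
    PySem.Dict.nodup_keys_ofList (ps := c)
  show _ = (PySem.Dict.ofList (pwrGo (PySem.Dict.ofList r) (PySem.Dict.ofList c).items) : PySem.Dict String Int).items
  rw [foldA_items _ _ hr hck, pwrGo_eq,
      items_ofList_nodup _ ((filterMap_gL_keys_sublist _ _).nodup hc)]
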